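-- pv_equiv track=rewrite | github.com/InfolabAI/programmers_hee | 프로그래머스/3/258709. 주사위 고르기/주사위 고르기.py | solution
-- ===== SOURCE A (Python) =====
-- from itertools import combinations as cb
-- from itertools import product as pd
-- from collections import Counter
--
-- def get_winrate(ad, bd):
--     acases = list(map(sum, pd(*ad))) # 선택한 주사위의 경우의 수
--     bcases = list(map(sum, pd(*bd)))
--     act, bct = Counter(acases), Counter(bcases)
--     w, wl, l = 0, 0, 0
--     for sa, na in act.items():
--         for sb, nb in bct.items():
--             if sa > sb:
--                 w += (na*nb)
--             #elif sa == sb: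
--             #    wl += (na*nb)
--             #else:
--             #    l += (na*nb)
--     return w, wl, l
--
-- def select(dice, indices):
--     ret = []
--     for i in indices:
--         ret.append(dice[i])
--     return ret
--
-- def choices(dice):
--     a_choices = list(cb(range(len(dice)), len(dice)//2)) # 주사위 선택
--     b_choices = []
--     for a_c in a_choices:
--         b_c = list(set((range(len(dice)))) - set(a_c))
--         b_choices.append(b_c)
--     return a_choices, b_choices
--
-- def solution(dice):
--     mx, answer = 0, 0
--     for (a_c, b_c) in zip(*choices(dice)):
--         ad = select(dice, a_c)
--         bd = select(dice, b_c)
--         w = get_winrate(ad, bd)[0]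
--         if w > mx:
--             mx = w
--             answer = list(a_c)
--     for i in range(len(answer)):
--         answer[i] += 1
--     return answer
-- ===== SOURCE B (Python) =====
-- from itertools import combinations
-- from bisect import bisect_left
--
--
-- def solution(dice):
--     n = len(dice)
--
--     def sums(ds):
--         # all face-sum outcomes of the dice in ds
--         acc = [0]
--         for d in ds:
--             acc = [s + f for s in acc for f in d]
--         return acc
--
--     best_w, best = 0, None
--     for a_c in combinations(range(n), n // 2):
--         a_set = set(a_c)
--         asums = sums([dice[i] for i in a_c])
--         bsorted = sorted(sums([dice[i] for i in range(n) if i not in a_set]))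
--         w = sum(bisect_left(bsorted, a) for a in asums)
--         if w > best_w:
--             best_w, best = w, list(a_c)
--     return [i + 1 for i in best]
-- ===== Notes on version B (the rewrite author's own statement) =====
-- stated objective: faster
-- what changed: Per dice split, A counts wins with a Counter-of-sums double loop over distinct-sum pairs; B sorts one side's sums once and sums bisect_left positions of the other side's sums, removing the inner scan.
import Mathlib
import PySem

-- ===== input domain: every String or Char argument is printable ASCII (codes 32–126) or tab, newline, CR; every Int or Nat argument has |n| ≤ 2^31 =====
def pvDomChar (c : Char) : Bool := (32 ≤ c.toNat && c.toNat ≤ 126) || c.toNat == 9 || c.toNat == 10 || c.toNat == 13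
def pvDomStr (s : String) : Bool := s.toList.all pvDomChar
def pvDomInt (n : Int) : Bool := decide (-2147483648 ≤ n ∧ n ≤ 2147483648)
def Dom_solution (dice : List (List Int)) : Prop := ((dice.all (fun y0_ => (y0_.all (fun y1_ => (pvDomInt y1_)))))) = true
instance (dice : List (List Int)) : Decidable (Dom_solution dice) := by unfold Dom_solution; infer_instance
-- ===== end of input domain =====

-- B replaces A's Counter×Counter double loop per dice split by sorted sums + bisect_left
-- (same winning split and same tie-breaking; equivalence of the RETURN value is proved below).

-- ===== PORT A =====
-- itertools.combinations(xs, k) in itertools' lexicographic order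
-- (shared helper: both Source A and Source B call the same stdlib itertools.combinations).
def pyCombos : Nat → List Int → List (List Int)
  | 0, _ => [[]]
  | _ + 1, [] => []
  | k + 1, x :: xs => (pyCombos k xs).map (fun c => x :: c) ++ pyCombos (k + 1) xs

-- itertools.product(*ds): rightmost factor varies fastest
def pyProd : List (List Int) → List (List Int)
  | [] => [[]]
  | d :: ds => d.flatMap (fun f => (pyProd ds).map (fun c => f :: c))

def getWinrate (ad bd : List (List Int)) : Int × Int × Int :=
  let acases := (pyProd ad).map List.sum
  let bcases := (pyProd bd).map List.sum
  let act := PySem.Dict.counter acases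
  let bct := PySem.Dict.counter bcases
  let w := act.items.foldl (fun w p =>
      bct.items.foldl (fun w q => if p.1 > q.1 then w + p.2 * q.2 else w) w) 0
  (w, 0, 0)

-- indices produced by combinations/set-difference over range(len(dice)) are always in range,
-- so the total pyGetD with default [] is exact here
def select (dice : List (List Int)) (indices : List Int) : List (List Int) :=
  indices.foldl (fun ret i => ret ++ [PySem.List.pyGetD dice i []]) []

-- b_c = list(set(range(n)) - set(a_c)); its CPython iteration order is consumed only through
-- sums/Counter, on which solution's result is order-independent, so Set.diff's order is exact for the output
def choicesA (dice : List (List Int)) : List (List Int) × List (List Int) :=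
  let aChoices := pyCombos (dice.length / 2) (PySem.List.pyRange 0 (dice.length : Int) 1)
  let bChoices := aChoices.foldl (fun acc aC =>
      acc ++ [PySem.Set.diff (PySem.Set.ofList (PySem.List.pyRange 0 (dice.length : Int) 1)) (PySem.Set.ofList aC)]) []
  (aChoices, bChoices)

-- 'mx, answer = 0, 0': the int 0 in answer is a never-assigned sentinel, modelled as none;
-- Python raises TypeError at 'range(len(answer))' when it survives — those inputs are outside Pre_solution
def solution (dice : List (List Int)) : List Int :=
  let st := ((choicesA dice).1.zip (choicesA dice).2).foldl
    (fun (st : Int × Option (List Int)) pc =>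
      let ad := select dice pc.1
      let bd := select dice pc.2
      let w := (getWinrate ad bd).1
      if w > st.1 then (w, some pc.1) else st) (0, none)
  match st.2 with
  | some answer => answer.map (fun i => i + 1)  -- 'for i in range(len(answer)): answer[i] += 1'
  | none => []

-- ===== PORT B =====
-- sums(ds): fold convolving the face lists, 'acc = [s + f for s in acc for f in d]'
def sumsB (ds : List (List Int)) : List Int :=
  ds.foldl (fun acc d => acc.flatMap (fun s => d.map (fun f => s + f))) [0]

def solution_alt (dice : List (List Int)) : List Int :=
  let n : Int := dice.length
  let best := (pyCombos (dice.length / 2) (PySem.List.pyRange 0 n 1)).foldl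
    (fun (st : Int × Option (List Int)) aC =>
      let aSet := PySem.Set.ofList aC
      let asums := sumsB (aC.map (fun i => PySem.List.pyGetD dice i []))
      let bsorted := PySem.List.sorted
        (sumsB (((PySem.List.pyRange 0 n 1).filter (fun i => !(PySem.Set.contains aSet i))).map
          (fun i => PySem.List.pyGetD dice i []))) (fun x => x) false
      let w := (asums.map (fun a => (PySem.List.bisectLeft bsorted a : Int))).sum
      if w > st.1 then (w, some aC) else st) (0, none)
  match best.2 with
  | some a => a.map (fun i => i + 1)
  | none => []  -- Source B raises TypeError on best = None; outside Pre_solution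

-- ===== PRECONDITION & SPEC =====
-- Pre_solution is exactly where Python A returns: some half-split whose maximal total beats the
-- other half's minimal total exists (otherwise every split's win count is 0, answer stays the int 0,
-- and both Source A and Source B raise TypeError); empty dice are required absent for the same reason.
def Pre_solution (dice : List (List Int)) : Prop :=
  (∀ d ∈ dice, d ≠ []) ∧
  ∃ s ∈ Finset.powersetCard (dice.length / 2) (Finset.range dice.length),
    (∑ i ∈ s, ((dice.getD i []).max?.getD 0)) >
      ∑ i ∈ Finset.range dice.length \ s, ((dice.getD i []).min?.getD 0)
instance (dice : List (List Int)) : Decidable (Pre_solution dice) := by unfold Pre_solution; infer_instance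
def pvWitness_solution : List (List Int) := [[1], [2]]

def Spec_solution (dice : List (List Int)) (out : List Int) : Prop := out = solution_alt dice
instance (dice : List (List Int)) (out : List Int) : Decidable (Spec_solution dice out) := by unfold Spec_solution; infer_instance

-- ===== CLAIM (what is proved, stated in full; the proofs are below) =====
def Claim_equal_solution : Prop := ∀ (dice : List (List Int)), Dom_solution dice → Pre_solution dice → Spec_solution dice (solution dice)

-- ===== LEMMAS AND PROOFS =====

theorem select_eq_map (dice : List (List Int)) (l : List Int) :
    select dice l = l.map (fun i => PySem.List.pyGetD dice i []) := by
  simpa [select] using PySem.List.foldl_append_singleton_eq_map (fun i => PySem.List.pyGetD dice i []) l []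

theorem sumsB_aux (ds : List (List Int)) (acc : List Int) :
    ds.foldl (fun acc d => acc.flatMap (fun s => d.map (fun f => s + f))) acc
      = acc.flatMap (fun s => (pyProd ds).map (fun c => s + c.sum)) := by
  induction ds generalizing acc with
  | nil => simp [pyProd]
  | cons d ds ih =>
      simp only [List.foldl_cons, ih, pyProd, List.flatMap_assoc, List.map_flatMap,
        List.flatMap_map, List.map_map]
      congr 1; funext s; congr 1; funext f
      simp [Function.comp, add_assoc]

theorem sumsB_eq (ds : List (List Int)) : sumsB ds = (pyProd ds).map List.sum := by
  simpa [sumsB] using sumsB_aux ds [0]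

-- a foldl accumulating with a guarded add IS a sum
theorem foldl_add_ite {β : Type} (l : List β) (P : β → Prop) [DecidablePred P]
    (f : β → Int) (a : Int) :
    l.foldl (fun w q => if P q then w + f q else w) a
      = a + (l.map (fun q => if P q then f q else 0)).sum := by
  have h : (fun (w : Int) q => if P q then w + f q else w)
      = fun w q => w + (if P q then f q else 0) := by
    funext w q; split <;> simp
  rw [h, PySem.List.foldl_add]

-- summing g over a list = summing count·g over its distinct elements
theorem count_dedup_sum (xs : List Int) (g : Int → Int) :
    ((PySem.Set.ofList xs).map (fun k => (xs.count k : Int) * g k)).sum = (xs.map g).sum := by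
  have hfin : (PySem.Set.ofList xs).toFinset = xs.toFinset := by
    ext m; simp [PySem.Set.mem_ofList]
  rw [Finset.sum_list_map_count xs g,
    Eq.symm (List.sum_toFinset (fun k => (xs.count k : Int) * g k) (PySem.Set.nodup_ofList xs)),
    hfin]
  refine Finset.sum_congr rfl (fun m _ => ?_)
  simp

-- on a ≤-sorted list, bisect_left counts the elements below x
theorem bisectLeft_eq_countP (xs : List Int) (x : Int)
    (h : xs.Pairwise (fun a b => a ≤ b)) :
    PySem.List.bisectLeft xs x = xs.countP (fun b => decide (b < x)) := by
  obtain ⟨hk, hlt, hge⟩ := PySem.List.bisectLeft_spec xs x h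
  set k := PySem.List.bisectLeft xs x with hkdef
  have hsplit : xs = xs.take k ++ xs.drop k := (List.take_append_drop k xs).symm
  rw [hsplit, List.countP_append]
  have h1 : (xs.take k).countP (fun b => decide (b < x)) = k := by
    rw [List.countP_eq_length.mpr, List.length_take_of_le hk]
    intro b hb
    rw [List.mem_take_iff_getElem] at hb
    obtain ⟨j, hj, rfl⟩ := hb
    have hj' : j < xs.length := lt_of_lt_of_le (lt_of_lt_of_le hj (min_le_right _ _)) le_rfl
    simpa using hlt j hj' (lt_of_lt_of_le hj (min_le_left _ _))
  have h2 : (xs.drop k).countP (fun b => decide (b < x)) = 0 := by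
    rw [List.countP_eq_zero]
    intro b hb
    rw [List.mem_drop_iff_getElem] at hb
    obtain ⟨j, hj, rfl⟩ := hb
    simpa using not_lt.mpr (hge (k + j) (by omega) (Nat.le_add_right _ _))
  omega

-- the per-split win count: A's Counter double loop = B's sorted+bisect sum
theorem winrate_eq (ad bd : List (List Int)) :
    (getWinrate ad bd).1
      = ((sumsB ad).map (fun a =>
          (PySem.List.bisectLeft (PySem.List.sorted (sumsB bd) (fun x => x) false) a : Int))).sum := by
  rw [sumsB_eq ad, sumsB_eq bd]
  set ac := (pyProd ad).map List.sum with hac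
  set bc := (pyProd bd).map List.sum with hbc
  have hrhs : ∀ a : Int,
      PySem.List.bisectLeft (PySem.List.sorted bc (fun x => x) false) a
        = bc.countP (fun b => decide (b < a)) := by
    intro a
    rw [bisectLeft_eq_countP _ _ (PySem.List.sorted_pairwise bc (fun x => x))]
    exact (PySem.List.sorted_perm bc (fun x => x) false).countP_eq _
  have h1 : (getWinrate ad bd).1
      = ((PySem.Dict.counter ac).items.map (fun p =>
          ((PySem.Dict.counter bc).items.map (fun q =>
            if p.1 > q.1 then p.2 * q.2 else 0)).sum)).sum := by
    show List.foldl _ 0 _ = _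
    have houter : (fun (w : Int) (p : Int × Int) =>
        List.foldl (fun w q => if p.1 > q.1 then w + p.2 * q.2 else w) w
          (PySem.Dict.counter bc).items)
        = fun w p => w + ((PySem.Dict.counter bc).items.map (fun q =>
            if p.1 > q.1 then p.2 * q.2 else 0)).sum := by
      funext w p
      exact foldl_add_ite _ _ _ w
    rw [houter, PySem.List.foldl_add, zero_add]
  have h2 : ∀ k : Int,
      ((PySem.Set.ofList bc).map (fun k' =>
        if k > k' then (ac.count k : Int) * (bc.count k' : Int) else 0)).sum
      = (ac.count k : Int) * (bc.countP (fun b => decide (b < k)) : Int) := by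
    intro k
    have e1 : (fun k' => if k > k' then (ac.count k : Int) * (bc.count k' : Int) else 0)
        = fun k' => (bc.count k' : Int) * ((ac.count k : Int) * (if k' < k then 1 else 0)) := by
      funext k'
      by_cases h : k' < k
      · simp [h]; ring
      · simp [h]
    rw [e1, count_dedup_sum bc, List.sum_map_mul_left]
    congr 1
    simpa using PySem.List.sum_map_ite_one_zero (fun b => decide (b < k)) bc
  rw [h1, PySem.Dict.items_counter, PySem.Dict.items_counter, List.map_map]
  have e2 : ((fun p : Int × Int =>
        ((PySem.Set.ofList bc).map (fun k => (k, (bc.count k : Int)))).map (fun q =>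
          if p.1 > q.1 then p.2 * q.2 else 0) |>.sum)
      ∘ fun k => (k, (ac.count k : Int)))
      = fun k => (ac.count k : Int) * (bc.countP (fun b => decide (b < k)) : Int) := by
    funext k
    simp only [Function.comp, List.map_map]
    exact h2 k
  rw [e2, count_dedup_sum ac]
  simp only [hrhs]

theorem diff_range_eq (n : Int) (aC : List Int) :
    PySem.Set.diff (PySem.Set.ofList (PySem.List.pyRange 0 n 1)) (PySem.Set.ofList aC)
      = (PySem.List.pyRange 0 n 1).filter (fun i => !(PySem.Set.contains (PySem.Set.ofList aC) i)) := by
  have hnd : (PySem.List.pyRange 0 n 1).Nodup := by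
    rw [PySem.List.pyRange_one]
    exact List.nodup_range.map (fun a b h => by simpa using h)
  rw [PySem.Set.ofList_eq_self_of_nodup _ hnd]
  rfl

theorem solution_eq (dice : List (List Int)) : solution dice = solution_alt dice := by
  unfold solution solution_alt choicesA
  simp only [PySem.List.foldl_append_singleton_eq_map, List.nil_append]
  have hz : ∀ (f : List Int → List Int) (L : List (List Int)),
      L.zip (L.map f) = L.map (fun c => (c, f c)) := by
    intro f L
    calc L.zip (L.map f) = (L.map id).zip (L.map f) := by rw [List.map_id]
      _ = L.map (fun c => (id c, f c)) := List.zip_map'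
      _ = L.map (fun c => (c, f c)) := rfl
  rw [hz, List.foldl_map]
  congr 3
  funext st c
  simp only [select_eq_map, diff_range_eq, winrate_eq]

-- ===== VERDICT (by name: the statement is the Claim_ definition above) =====
theorem solution_spec : Claim_equal_solution := by
  intro dice _ _
  unfold Spec_solution
  exact solution_eq dice
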